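-- pv_equiv track=rewrite | github.com/zy0016/easycopy | zhongbaodeng/20250213/abs_product/func.py | merge_maps_data
-- ===== SOURCE A (Python) =====
-- def merge_maps_data(map1,map2):
--     resmap = {}
--     for key in map1:
--         #key是管理人名字
--         # 0:固定收益类
--         # 1:权益类
--         # 2:商品及金融衍生品类
--         # 9:混合类
--         v1map = map1[key]
--         v0 = 0
--         v1 = 0
--         v2 = 0
--         v9 = 0
--         if "0" in v1map and str_is_int(v1map["0"]):
--             v0 = int(v1map["0"])
--         if "1" in v1map and str_is_int(v1map["1"]):
--             v1 = int(v1map["1"])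
--         if "2" in v1map and str_is_int(v1map["2"]):
--             v2 = int(v1map["2"])
--         if "9" in v1map and str_is_int(v1map["9"]):
--             v9 = int(v1map["9"])
--
--         resmap[key] = {"fixed":v0,"right":v1,"product_finance":v2,"mixed":v9,"open":0,"close":0}
--
--     for key in map2:
--         #key是管理人名字
--         # 1:开放式
--         # 2:封闭式
--         v2map = map2[key]
--         v1 = 0
--         v2 = 0
--         if "1" in v2map and str_is_int(v2map["1"]):
--             v1 = int(v2map["1"])
--         if "2" in v2map and str_is_int(v2map["2"]):
--             v2 = int(v2map["2"])
--
--         if key in resmap: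
--             resmap[key]["open"] = v1
--             resmap[key]["close"] = v2
--         else:
--             resmap[key] = {"fixed":0,"right":0,"product_finance":0,"mixed":0,"open":v1,"close":v2}
--
--     return resmap
--
-- def str_is_int(v):
--     try:
--         int(v)
--         return True
--     except ValueError:
--         return False
-- ===== SOURCE B (Python) =====
-- def merge_maps_data(map1, map2):
--     res = {}
--     for key in dict.fromkeys(list(map1) + list(map2)):
--         d1 = map1.get(key, {})
--         d2 = map2.get(key, {})
--         res[key] = {"fixed": _grab(d1, "0"), "right": _grab(d1, "1"),
--                     "product_finance": _grab(d1, "2"), "mixed": _grab(d1, "9"),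
--                     "open": _grab(d2, "1"), "close": _grab(d2, "2")}
--     return res
--
--
-- def _grab(d, k):
--     s = d.get(k)
--     if s is None:
--         return 0
--     try:
--         return int(s)
--     except ValueError:
--         return 0
-- ===== Notes on version B (the rewrite author's own statement) =====
-- stated objective: simpler
-- what changed: A builds records in one pass over map1 and then patches/extends them in a second pass over map2; B computes the key union once and assembles each six-field record in a single place with one shared extractor, with no in-place patching.
import Mathlib
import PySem

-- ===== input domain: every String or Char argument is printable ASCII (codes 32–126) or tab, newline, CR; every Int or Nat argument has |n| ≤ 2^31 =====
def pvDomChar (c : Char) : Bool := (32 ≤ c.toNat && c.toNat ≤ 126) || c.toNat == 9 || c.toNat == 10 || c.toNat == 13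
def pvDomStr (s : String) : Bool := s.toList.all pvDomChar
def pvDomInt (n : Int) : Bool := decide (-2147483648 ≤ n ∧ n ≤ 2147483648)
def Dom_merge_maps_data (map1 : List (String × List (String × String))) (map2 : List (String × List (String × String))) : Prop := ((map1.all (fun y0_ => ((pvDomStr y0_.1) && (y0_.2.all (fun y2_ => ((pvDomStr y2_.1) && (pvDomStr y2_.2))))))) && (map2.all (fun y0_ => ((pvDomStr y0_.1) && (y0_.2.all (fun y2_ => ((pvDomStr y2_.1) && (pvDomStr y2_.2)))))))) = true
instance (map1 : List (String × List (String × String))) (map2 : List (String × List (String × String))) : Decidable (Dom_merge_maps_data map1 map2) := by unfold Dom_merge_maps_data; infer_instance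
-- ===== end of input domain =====

-- B replaces A's two sequential passes (build from map1, then patch/extend from map2) by one
-- assembling pass over the union of keys, with a single shared field extractor: simpler. No speed claim.

-- ===== PORT A =====
-- str_is_int(v): int(v) succeeds (ValueError = none); PySem.Int.ofStr? is exactly int(str)
def str_is_int (v : String) : Bool := (PySem.Int.ofStr? v).isSome

-- int(v); only applied where str_is_int v already holds, so the default is never used
def pvToInt (v : String) : Int := (PySem.Int.ofStr? v).getD 0

-- the record built in A's first loop (dict literal with distinct keys);
-- v1map["k"] after the 'in' test is transliterated as getD with "" (str_is_int "" = false)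
def pvRecA1 (v1list : List (String × String)) : PySem.Dict String Int :=
  let v1map := PySem.Dict.ofList v1list
  let v0 : Int := if v1map.contains "0" && str_is_int (v1map.getD "0" "") then pvToInt (v1map.getD "0" "") else 0
  let v1 : Int := if v1map.contains "1" && str_is_int (v1map.getD "1" "") then pvToInt (v1map.getD "1" "") else 0
  let v2 : Int := if v1map.contains "2" && str_is_int (v1map.getD "2" "") then pvToInt (v1map.getD "2" "") else 0
  let v9 : Int := if v1map.contains "9" && str_is_int (v1map.getD "9" "") then pvToInt (v1map.getD "9" "") else 0
  PySem.Dict.mk [("fixed", v0), ("right", v1), ("product_finance", v2), ("mixed", v9), ("open", 0), ("close", 0)]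

-- body of A's first loop
def pvA1step (resmap : PySem.Dict String (PySem.Dict String Int)) (kv : String × List (String × String)) : PySem.Dict String (PySem.Dict String Int) :=
  resmap.insert kv.1 (pvRecA1 kv.2)

-- body of A's second loop
def pvA2step (resmap : PySem.Dict String (PySem.Dict String Int)) (kv : String × List (String × String)) : PySem.Dict String (PySem.Dict String Int) :=
  let v2map := PySem.Dict.ofList kv.2
  let v1 : Int := if v2map.contains "1" && str_is_int (v2map.getD "1" "") then pvToInt (v2map.getD "1" "") else 0
  let v2 : Int := if v2map.contains "2" && str_is_int (v2map.getD "2" "") then pvToInt (v2map.getD "2" "") else 0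
  if resmap.contains kv.1 then
    (resmap.modify kv.1 PySem.Dict.empty (fun r => r.insert "open" v1)).modify kv.1 PySem.Dict.empty (fun r => r.insert "close" v2)
  else
    resmap.insert kv.1 (PySem.Dict.mk [("fixed", 0), ("right", 0), ("product_finance", 0), ("mixed", 0), ("open", v1), ("close", v2)])

def merge_maps_data (map1 : List (String × List (String × String))) (map2 : List (String × List (String × String))) : List (String × List (String × Int)) :=
  let m1 := PySem.Dict.ofList map1
  let m2 := PySem.Dict.ofList map2
  let resmap := m1.items.foldl pvA1step PySem.Dict.empty
  let resmap := m2.items.foldl pvA2step resmap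
  resmap.items.map (fun kv => (kv.1, kv.2.items))

-- ===== PORT B =====
-- _grab(d, k) of Source B: d.get(k), then int(s) if it parses else 0
def pvGrab (d : PySem.Dict String String) (k : String) : Int :=
  match d.get? k with
  | none => 0
  | some s =>
    match PySem.Int.ofStr? s with
    | some n => n
    | none => 0

-- the six-field record assembled for one key of the union
def pvRecB (m1 m2 : PySem.Dict String (List (String × String))) (key : String) : PySem.Dict String Int :=
  let d1 := PySem.Dict.ofList (m1.getD key [])
  let d2 := PySem.Dict.ofList (m2.getD key [])
  PySem.Dict.mk [("fixed", pvGrab d1 "0"), ("right", pvGrab d1 "1"), ("product_finance", pvGrab d1 "2"),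
                 ("mixed", pvGrab d1 "9"), ("open", pvGrab d2 "1"), ("close", pvGrab d2 "2")]

-- body of Source B's single loop
def pvBstep (m1 m2 : PySem.Dict String (List (String × String))) (res : PySem.Dict String (PySem.Dict String Int)) (key : String) : PySem.Dict String (PySem.Dict String Int) :=
  res.insert key (pvRecB m1 m2 key)

def merge_maps_data_alt (map1 : List (String × List (String × String))) (map2 : List (String × List (String × String))) : List (String × List (String × Int)) :=
  let m1 := PySem.Dict.ofList map1
  let m2 := PySem.Dict.ofList map2
  let res := (PySem.List.dedup (m1.keys ++ m2.keys)).foldl (pvBstep m1 m2) PySem.Dict.empty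
  res.items.map (fun kv => (kv.1, kv.2.items))

-- ===== PRECONDITION & SPEC =====
def Spec_merge_maps_data (map1 : List (String × List (String × String))) (map2 : List (String × List (String × String))) (out : List (String × List (String × Int))) : Prop := out = merge_maps_data_alt map1 map2
instance (map1 : List (String × List (String × String))) (map2 : List (String × List (String × String))) (out : List (String × List (String × Int))) : Decidable (Spec_merge_maps_data map1 map2 out) := by unfold Spec_merge_maps_data; infer_instance

-- ===== CLAIM (what is proved, stated in full; the proofs are below) =====
def Claim_equal_merge_maps_data : Prop := ∀ (map1 : List (String × List (String × String))) (map2 : List (String × List (String × String))), Dom_merge_maps_data map1 map2 → Spec_merge_maps_data map1 map2 (merge_maps_data map1 map2)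

-- ===== LEMMAS AND PROOFS =====

-- the patch of A's second loop for a key already present, and the fresh record of its else-branch
def pvPatch (r : PySem.Dict String Int) (v2list : List (String × String)) : PySem.Dict String Int :=
  (r.insert "open" (pvGrab (PySem.Dict.ofList v2list) "1")).insert "close" (pvGrab (PySem.Dict.ofList v2list) "2")

def pvNew (v2list : List (String × String)) : PySem.Dict String Int :=
  PySem.Dict.mk [("fixed", 0), ("right", 0), ("product_finance", 0), ("mixed", 0),
    ("open", pvGrab (PySem.Dict.ofList v2list) "1"), ("close", pvGrab (PySem.Dict.ofList v2list) "2")]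

-- A's per-field extraction equals B's _grab
lemma field_eq_grab (d : PySem.Dict String String) (k : String) :
    (if d.contains k && str_is_int (d.getD k "") then pvToInt (d.getD k "") else 0) = pvGrab d k := by
  rcases h : d.get? k with _ | s
  · have hc : d.contains k = false := (PySem.Dict.get?_eq_none_iff_contains d k).mp h
    simp [pvGrab, h, hc]
  · have hc : d.contains k = true := by
      rw [PySem.Dict.contains_eq_isSome_get?, h]; rfl
    have hd : d.getD k "" = s := by rw [PySem.Dict.getD_eq_get?_getD, h]; rfl
    rcases hs : PySem.Int.ofStr? s with _ | n
    · simp [pvGrab, h, hc, hd, str_is_int, hs]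
    · simp [pvGrab, h, hc, hd, str_is_int, pvToInt, hs]

-- patching "open"/"close" into a six-field literal record
lemma insert_open_close (a b c d v1 v2 : Int) :
    ((PySem.Dict.mk [("fixed", a), ("right", b), ("product_finance", c), ("mixed", d), ("open", (0:Int)), ("close", 0)]).insert "open" v1).insert "close" v2
      = PySem.Dict.mk [("fixed", a), ("right", b), ("product_finance", c), ("mixed", d), ("open", v1), ("close", v2)] := by
  simp [PySem.Dict.insert, PySem.Dict.contains]

-- the combined effect of A's two modify statements
lemma a2step_contains (res : PySem.Dict String (PySem.Dict String Int)) (kv : String × List (String × String))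
    (h : res.contains kv.1 = true) :
    pvA2step res kv = res.insert kv.1 (pvPatch (res.getD kv.1 PySem.Dict.empty) kv.2) := by
  rw [pvPatch]
  rw [pvA2step]
  simp only [field_eq_grab, h, if_pos]
  rw [PySem.Dict.modify, PySem.Dict.modify, PySem.Dict.insert_insert_self,
    PySem.Dict.getD_insert_self]

lemma a2step_not_contains (res : PySem.Dict String (PySem.Dict String Int)) (kv : String × List (String × String))
    (h : res.contains kv.1 = false) :
    pvA2step res kv = res.insert kv.1 (pvNew kv.2) := by
  rw [pvNew]
  rw [pvA2step]
  simp only [field_eq_grab, h, if_neg, Bool.false_eq_true, not_false_iff]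

-- the record of A's first loop, written with _grab
lemma recA1_eq (v1list : List (String × String)) :
    pvRecA1 v1list =
      PySem.Dict.mk [("fixed", pvGrab (PySem.Dict.ofList v1list) "0"), ("right", pvGrab (PySem.Dict.ofList v1list) "1"),
        ("product_finance", pvGrab (PySem.Dict.ofList v1list) "2"), ("mixed", pvGrab (PySem.Dict.ofList v1list) "9"),
        ("open", 0), ("close", 0)] := by
  rw [pvRecA1]
  simp only [field_eq_grab]

-- characterisation of A's second loop
lemma pass2_items (l : List (String × List (String × String))) (res : PySem.Dict String (PySem.Dict String Int))
    (hres : res.keys.Nodup) (hl : (l.map Prod.fst).Nodup) :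
    (l.foldl pvA2step res).items =
      res.items.map (fun p => match l.find? (fun q => q.1 == p.1) with
        | some q => (p.1, pvPatch p.2 q.2)
        | none => p)
      ++ (l.filter (fun q => !(res.contains q.1))).map (fun q => (q.1, pvNew q.2)) := by
  induction l generalizing res with
  | nil => simp
  | cons q l ih =>
    simp only [List.map_cons, List.nodup_cons, List.mem_map] at hl
    obtain ⟨hq, hl⟩ := hl
    by_cases hc : res.contains q.1 = true
    · rw [List.foldl_cons, a2step_contains res q hc]
      have hres' : (res.insert q.1 (pvPatch (res.getD q.1 PySem.Dict.empty) q.2)).keys.Nodup := by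
        rw [PySem.Dict.keys_insert_of_contains _ _ hc]; exact hres
      rw [ih _ hres' hl]
      congr 1
      · rw [PySem.Dict.items_insert_of_contains _ _ hc, List.map_map]
        apply List.map_congr_left
        intro p hp
        by_cases hpq : p.1 = q.1
        · have hfind : l.find? (fun q' => q'.1 == q.1) = none := by
            rw [List.find?_eq_none]
            intro x hx
            simp only [beq_iff_eq]
            intro hx1; exact hq ⟨x, hx, hx1⟩
          have hget : res.getD q.1 PySem.Dict.empty = p.2 := by
            have : (q.1, p.2) ∈ res.items := by
              have := hp; rwa [show p = (q.1, p.2) by rw [← hpq]] at this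
            exact PySem.Dict.getD_of_mem_items _ this hres _
          simp only [Function.comp, hpq, beq_self_eq_true, if_pos, List.find?_cons,
            hfind, hget]
        · have hne : (p.1 == q.1) = false := by simp [hpq]
          simp only [Function.comp, hne, if_neg, Bool.false_eq_true, not_false_iff,
            List.find?_cons]
          have : (q.1 == p.1) = false := by simp only [beq_eq_false_iff_ne, ne_eq]; exact fun h => hpq h.symm
          rw [this]
      · rw [List.filter_cons]
        simp only [hc, Bool.not_true, if_neg, Bool.false_eq_true, not_false_iff]
        apply congrArg
        apply List.filter_congr
        intro x hx
        rw [PySem.Dict.contains_insert]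
        have : (x.1 == q.1) = false := by
          simp only [beq_eq_false_iff_ne, ne_eq]
          intro h; exact hq ⟨x, hx, h⟩
        rw [this, Bool.false_or]
    · have hc' : res.contains q.1 = false := by simpa using hc
      rw [List.foldl_cons, a2step_not_contains res q hc']
      have hres' : (res.insert q.1 (pvNew q.2)).keys.Nodup := by
        rw [PySem.Dict.keys_insert_of_not_contains _ _ hc']
        refine List.Nodup.append hres (List.nodup_singleton _) ?_
        intro x hx hx'
        rw [List.mem_singleton] at hx'
        subst hx'
        rw [← PySem.Dict.contains_iff_mem_keys] at hx
        simp [hc'] at hx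
      rw [ih _ hres' hl]
      rw [PySem.Dict.items_insert_of_not_contains _ _ hc', List.map_append]
      have hfind : l.find? (fun q' => q'.1 == q.1) = none := by
        rw [List.find?_eq_none]
        intro x hx
        simp only [beq_iff_eq]
        intro hx1; exact hq ⟨x, hx, hx1⟩
      have hmapres : res.items.map (fun p => match l.find? (fun q' => q'.1 == p.1) with
          | some q' => (p.1, pvPatch p.2 q'.2)
          | none => p)
          = res.items.map (fun p => match (q :: l).find? (fun q' => q'.1 == p.1) with
          | some q' => (p.1, pvPatch p.2 q'.2)
          | none => p) := by
        apply List.map_congr_left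
        intro p hp
        have hpq : (q.1 == p.1) = false := by
          simp only [beq_eq_false_iff_ne, ne_eq]
          intro h
          have : res.contains q.1 = true := by
            rw [PySem.Dict.contains_iff_mem_keys, h]
            exact PySem.Dict.mem_keys_of_mem_items _ hp
          simp [hc'] at this
        rw [List.find?_cons, hpq]
      rw [hmapres]
      rw [List.filter_cons]
      simp only [hc', Bool.not_false, if_pos]
      rw [List.map_cons]
      have hfilter : l.filter (fun q' => !((res.insert q.1 (pvNew q.2)).contains q'.1))
          = l.filter (fun q' => !(res.contains q'.1)) := by
        apply List.filter_congr
        intro x hx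
        rw [PySem.Dict.contains_insert]
        have : (x.1 == q.1) = false := by
          simp only [beq_eq_false_iff_ne, ne_eq]
          intro h; exact hq ⟨x, hx, h⟩
        rw [this, Bool.false_or]
      rw [hfilter]
      have : l.find? (fun q' => (q'.1 == q.1)) = none := hfind
      simp [List.map_cons, this, pvNew, List.append_assoc]

lemma grab_nil (k : String) : pvGrab (PySem.Dict.ofList ([] : List (String × String))) k = 0 := rfl

-- record equality, key present in m1
lemma rec_eq_mem_m1 (m1 m2 : PySem.Dict String (List (String × String))) (hn1 : m1.keys.Nodup)
    (kv : String × List (String × String)) (hkv : kv ∈ m1.items) :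
    (match m2.items.find? (fun q => q.1 == kv.1) with
      | some q => (kv.1, pvPatch (pvRecA1 kv.2) q.2)
      | none => (kv.1, pvRecA1 kv.2)) = (kv.1, pvRecB m1 m2 kv.1) := by
  have hget1 : m1.getD kv.1 [] = kv.2 := by
    have : (kv.1, kv.2) ∈ m1.items := hkv
    exact PySem.Dict.getD_of_mem_items _ this hn1 _
  cases hf : m2.items.find? (fun q => q.1 == kv.1) with
  | none =>
    have hget2 : m2.getD kv.1 [] = [] := by
      rw [PySem.Dict.getD_eq_get?_getD]
      show ((m2.items.find? (fun q => q.1 == kv.1)).map (·.2)).getD [] = []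
      rw [hf]; rfl
    show (kv.1, pvRecA1 kv.2) = (kv.1, pvRecB m1 m2 kv.1)
    rw [recA1_eq, pvRecB, hget1, hget2]
    simp only [grab_nil]
  | some q =>
    have hget2 : m2.getD kv.1 [] = q.2 := by
      rw [PySem.Dict.getD_eq_get?_getD]
      show ((m2.items.find? (fun q => q.1 == kv.1)).map (·.2)).getD [] = q.2
      rw [hf]; rfl
    show (kv.1, pvPatch (pvRecA1 kv.2) q.2) = (kv.1, pvRecB m1 m2 kv.1)
    simp only [pvPatch]
    rw [recA1_eq, insert_open_close, pvRecB, hget1, hget2]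

-- record equality, key only in m2
lemma rec_eq_new (m1 m2 : PySem.Dict String (List (String × String))) (hn2 : m2.keys.Nodup)
    (q : String × List (String × String)) (hq : q ∈ m2.items) (hnotin : m1.contains q.1 = false) :
    pvNew q.2 = pvRecB m1 m2 q.1 := by
  have hget1 : m1.getD q.1 [] = [] := PySem.Dict.getD_of_not_contains _ _ hnotin
  have hget2 : m2.getD q.1 [] = q.2 := by
    have : (q.1, q.2) ∈ m2.items := hq
    exact PySem.Dict.getD_of_mem_items _ this hn2 _
  rw [pvNew, pvRecB, hget1, hget2]
  simp only [grab_nil]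

-- the whole pipeline, over already-built dicts
lemma core (m1 m2 : PySem.Dict String (List (String × String))) (hn1 : m1.keys.Nodup) (hn2 : m2.keys.Nodup) :
    (m2.items.foldl pvA2step (m1.items.foldl pvA1step PySem.Dict.empty)).items
      = ((PySem.List.dedup (m1.keys ++ m2.keys)).foldl (pvBstep m1 m2) PySem.Dict.empty).items := by
  -- A's first pass
  have hA1fun : pvA1step = fun (d : PySem.Dict String (PySem.Dict String Int)) (a : String × List (String × String)) => d.insert a.1 (pvRecA1 a.2) := rfl
  have hA1 : (m1.items.foldl pvA1step PySem.Dict.empty).items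
      = m1.items.map (fun kv => (kv.1, pvRecA1 kv.2)) := by
    rw [hA1fun, PySem.Dict.items_foldl_insert_fresh m1.items Prod.fst (fun kv => pvRecA1 kv.2) PySem.Dict.empty
      (fun a _ => PySem.Dict.contains_empty _) hn1]
    rfl
  have hA1keys : (m1.items.foldl pvA1step PySem.Dict.empty).keys = m1.keys := by
    show ((m1.items.foldl pvA1step PySem.Dict.empty).items).map Prod.fst = m1.keys
    rw [hA1, List.map_map]
    rfl
  have hA1nodup : (m1.items.foldl pvA1step PySem.Dict.empty).keys.Nodup := by rw [hA1keys]; exact hn1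
  have hA1cont : ∀ x, (m1.items.foldl pvA1step PySem.Dict.empty).contains x = PySem.Set.contains m1.keys x := by
    intro x
    by_cases hx : x ∈ m1.keys
    · rw [(PySem.Dict.contains_iff_mem_keys _ _).mpr (by rw [hA1keys]; exact hx)]
      rw [Eq.symm ((PySem.Set.contains_iff _ _).mpr hx)]
    · have h1 : (m1.items.foldl pvA1step PySem.Dict.empty).contains x = false := by
        rw [← Bool.not_eq_true]
        intro h
        exact hx (by rw [← hA1keys]; exact (PySem.Dict.contains_iff_mem_keys _ _).mp h)
      have h2 : PySem.Set.contains m1.keys x = false := by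
        rw [← Bool.not_eq_true]
        intro h
        exact hx ((PySem.Set.contains_iff _ _).mp h)
      rw [h1, h2]
  -- A's second pass
  rw [pass2_items _ _ hA1nodup hn2, hA1]
  -- B's pass
  have hkeysnodup : (PySem.List.dedup (m1.keys ++ m2.keys)).Nodup := by
    rw [PySem.List.dedup]; exact PySem.Set.nodup_ofList _
  have hBfun : pvBstep m1 m2 = fun (d : PySem.Dict String (PySem.Dict String Int)) (a : String) => d.insert a (pvRecB m1 m2 a) := rfl
  have hB : ((PySem.List.dedup (m1.keys ++ m2.keys)).foldl (pvBstep m1 m2) PySem.Dict.empty).items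
      = (PySem.List.dedup (m1.keys ++ m2.keys)).map (fun k => (k, pvRecB m1 m2 k)) := by
    rw [hBfun, PySem.Dict.items_foldl_insert_fresh _ (fun x => x) (pvRecB m1 m2) PySem.Dict.empty
      (fun a _ => PySem.Dict.contains_empty _) (by rw [List.map_id']; exact hkeysnodup)]
    rfl
  rw [hB]
  -- split the key union
  have hsplit : PySem.List.dedup (m1.keys ++ m2.keys)
      = m1.keys ++ m2.keys.filter (fun y => !(PySem.Set.contains m1.keys y)) := by
    rw [PySem.List.dedup, PySem.Set.ofList_append, PySem.Set.ofList_eq_self_of_nodup _ hn1,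
      PySem.Set.update_eq_append_filter, PySem.Set.ofList_eq_self_of_nodup _ hn2]
  rw [hsplit, List.map_append]
  congr 1
  · -- entries coming from map1
    have : m1.keys.map (fun k => (k, pvRecB m1 m2 k))
        = m1.items.map (fun kv => (kv.1, pvRecB m1 m2 kv.1)) := by
      show (m1.items.map Prod.fst).map (fun k => (k, pvRecB m1 m2 k)) = _
      rw [List.map_map]; rfl
    rw [this, List.map_map]
    apply List.map_congr_left
    intro kv hkv
    exact rec_eq_mem_m1 m1 m2 hn1 kv hkv
  · -- entries new in map2
    have hfilter : m2.items.filter (fun q => !((m1.items.foldl pvA1step PySem.Dict.empty).contains q.1))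
        = m2.items.filter (fun q => !(PySem.Set.contains m1.keys q.1)) := by
      apply List.filter_congr
      intro x _
      rw [hA1cont]
    rw [hfilter]
    have hkeys2 : m2.keys.filter (fun y => !(PySem.Set.contains m1.keys y))
        = (m2.items.filter (fun q => !(PySem.Set.contains m1.keys q.1))).map Prod.fst := by
      show (m2.items.map Prod.fst).filter _ = _
      rw [List.filter_map]
      rfl
    rw [hkeys2, List.map_map]
    apply List.map_congr_left
    intro q hq
    rw [List.mem_filter] at hq
    obtain ⟨hqmem, hqnot⟩ := hq
    have hnot' : PySem.Set.contains m1.keys q.1 = false := by simpa using hqnot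
    have hnotin : m1.contains q.1 = false := by
      rw [← Bool.not_eq_true]
      intro h
      rw [(PySem.Set.contains_iff _ _).mpr ((PySem.Dict.contains_iff_mem_keys _ _).mp h)] at hnot'
      exact absurd hnot' (by simp)
    show (q.1, pvNew q.2) = (q.1, pvRecB m1 m2 q.1)
    rw [rec_eq_new m1 m2 hn2 q hqmem hnotin]

-- ===== VERDICT (by name: the statement is the Claim_ definition above) =====
theorem merge_maps_data_spec : Claim_equal_merge_maps_data := by
  intro map1 map2 _
  unfold Spec_merge_maps_data
  exact congrArg (List.map fun kv => (kv.1, kv.2.items))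
    (core (PySem.Dict.ofList map1) (PySem.Dict.ofList map2)
      (PySem.Dict.nodup_keys_ofList map1) (PySem.Dict.nodup_keys_ofList map2))
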